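-- pv_equiv track=rewrite | github.com/toshiava/project1 | wareki.py | to_wareki
-- ===== SOURCE A (Python) =====
-- GENGO_TABLE = [
--     (2019, "令和"),
--     (1989, "平成"),
--     (1926, "昭和"),
--     (1912, "大正"),
--     (1868, "明治"),
-- ]
--
-- EARLIEST_YEAR = GENGO_TABLE[-1][0]  # 1868
--
-- def to_wareki(year: int) -> str:
--     """西暦年を和暦文字列に変換する。"""
--     if year < EARLIEST_YEAR:
--         raise ValueError(f"{year}年は対応範囲外です（{EARLIEST_YEAR}年以降を指定してください）。")
--
--     for start, name in GENGO_TABLE: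
--         if year >= start:
--             nen = year - start + 1
--             nen_str = "元" if nen == 1 else str(nen)
--             return f"{name}{nen_str}年"
--
--     # ここには到達しないが念のため
--     raise ValueError(f"{year}年は対応する元号が見つかりません。")
-- ===== SOURCE B (Python) =====
-- _STARTS = [1868, 1912, 1926, 1989, 2019]
-- _NAMES = ["明治", "大正", "昭和", "平成", "令和"]
--
--
-- def _bisect_right(a, x):
--     """Index of the first element of sorted a that is > x (binary search)."""
--     lo, hi = 0, len(a)
--     while lo < hi:
--         mid = (lo + hi) // 2
--         if x < a[mid]:
--             hi = mid
--         else: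
--             lo = mid + 1
--     return lo
--
--
-- def to_wareki(year: int) -> str:
--     """西暦年を和暦文字列に変換する。"""
--     if year < _STARTS[0]:
--         raise ValueError(f"{year}年は対応範囲外です（{_STARTS[0]}年以降を指定してください）。")
--     i = _bisect_right(_STARTS, year) - 1
--     nen = year - _STARTS[i] + 1
--     nen_str = "元" if nen == 1 else str(nen)
--     return f"{_NAMES[i]}{nen_str}年"
-- ===== Notes on version B (the rewrite author's own statement) =====
-- stated objective: alternative
-- what changed: Replaces the linear scan over the descending era table with a binary search (hand-written bisect_right) over an ascending list of era start years; same ValueError guard and formatting.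
import Mathlib
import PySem

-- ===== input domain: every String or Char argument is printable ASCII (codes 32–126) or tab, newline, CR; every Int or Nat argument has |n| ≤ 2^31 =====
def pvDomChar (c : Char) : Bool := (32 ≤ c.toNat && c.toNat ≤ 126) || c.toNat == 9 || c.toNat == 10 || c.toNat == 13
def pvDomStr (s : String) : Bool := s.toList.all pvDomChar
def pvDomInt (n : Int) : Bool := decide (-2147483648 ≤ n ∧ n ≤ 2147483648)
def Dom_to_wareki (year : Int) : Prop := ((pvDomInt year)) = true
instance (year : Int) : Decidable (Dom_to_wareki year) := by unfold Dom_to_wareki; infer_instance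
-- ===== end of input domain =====

-- B replaces A's linear scan of the descending era table by a binary search over the
-- ascending era-start list (alternative algorithm, same results). Equivalence of the
-- RETURN value on 1868 ≤ year; both raise ValueError below that (excluded by Pre_).

-- ===== PORT A =====
def gengoTable : List (Int × String) :=
  [(2019, "令和"), (1989, "平成"), (1926, "昭和"), (1912, "大正"), (1868, "明治")]

-- the for-loop over GENGO_TABLE; "" stands for the (unreachable on Pre_) trailing raise
def warekiScan (year : Int) : List (Int × String) → String
  | [] => ""
  | (start, name) :: rest =>
      if year ≥ start then
        let nen := year - start + 1
        let nenStr := if nen = 1 then "元" else PySem.Int.toStr nen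
        name ++ nenStr ++ "年"
      else warekiScan year rest

def to_wareki (year : Int) : String :=
  if year < 1868 then ""   -- A raises ValueError here (outside Pre_)
  else warekiScan year gengoTable

-- ===== PORT B =====
def altStarts : List Int := [1868, 1912, 1926, 1989, 2019]
def altNames : List String := ["明治", "大正", "昭和", "平成", "令和"]

-- the while-loop of _bisect_right: fuel = hi - lo at entry
def brGo (a : List Int) (x : Int) : Nat → Nat → Nat → Nat
  | 0, lo, _ => lo
  | fuel + 1, lo, hi =>
      if lo < hi then
        let mid := (lo + hi) / 2
        if x < a.getD mid 0 then brGo a x fuel lo mid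
        else brGo a x fuel (mid + 1) hi
      else lo

def bisectRight (a : List Int) (x : Int) : Nat := brGo a x a.length 0 a.length

def to_wareki_alt (year : Int) : String :=
  if year < 1868 then ""   -- B raises ValueError here (outside Pre_)
  else
    let i := bisectRight altStarts year - 1
    let start := altStarts.getD i 0
    let nen := year - start + 1
    let nenStr := if nen = 1 then "元" else PySem.Int.toStr nen
    altNames.getD i "" ++ nenStr ++ "年"

-- ===== PRECONDITION & SPEC =====
-- Pre_ excludes year < 1868, on which both A and B raise ValueError.
def Pre_to_wareki (year : Int) : Prop := 1868 ≤ year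
instance (year : Int) : Decidable (Pre_to_wareki year) := by unfold Pre_to_wareki; infer_instance
def pvWitness_to_wareki : Int := (1989)

def Spec_to_wareki (year : Int) (out : String) : Prop := out = to_wareki_alt year
instance (year : Int) (out : String) : Decidable (Spec_to_wareki year out) := by unfold Spec_to_wareki; infer_instance

-- ===== CLAIM (what is proved, stated in full; the proofs are below) =====
def Claim_equal_to_wareki : Prop := ∀ (year : Int), Dom_to_wareki year → Pre_to_wareki year → Spec_to_wareki year (to_wareki year)

-- ===== LEMMAS AND PROOFS =====

-- ===== VERDICT (by name: the statement is the Claim_ definition above) =====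
theorem to_wareki_spec : Claim_equal_to_wareki := by
  intro year _ hpre
  unfold Pre_to_wareki at hpre
  unfold Spec_to_wareki to_wareki to_wareki_alt bisectRight
  rcases lt_or_ge year 1912 with h1 | h1
  · simp [warekiScan, gengoTable, altStarts, altNames, brGo, show ¬ year < 1868 from by omega, show ¬ year ≥ 2019 from by omega,
      show ¬ year ≥ 1989 from by omega, show ¬ year ≥ 1926 from by omega,
      show ¬ year ≥ 1912 from by omega, show year ≥ 1868 from by omega,
      show year < 1926 from by omega, show ¬ year < 1868 from by omega,
      show year < 1912 from by omega]
  · rcases lt_or_ge year 1926 with h2 | h2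
    · simp [warekiScan, gengoTable, altStarts, altNames, brGo, show ¬ year < 1868 from by omega, show ¬ year ≥ 2019 from by omega,
        show ¬ year ≥ 1989 from by omega, show ¬ year ≥ 1926 from by omega,
        show year ≥ 1912 from by omega, show year < 1926 from by omega,
        show ¬ year < 1912 from by omega]
    · rcases lt_or_ge year 1989 with h3 | h3
      · simp [warekiScan, gengoTable, altStarts, altNames, brGo, show ¬ year < 1868 from by omega, show ¬ year ≥ 2019 from by omega,
          show ¬ year ≥ 1989 from by omega, show year ≥ 1926 from by omega,
          show ¬ year < 1926 from by omega, show year < 1989 from by omega,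
          show year < 2019 from by omega]
      · rcases lt_or_ge year 2019 with h4 | h4
        · simp [warekiScan, gengoTable, altStarts, altNames, brGo, show ¬ year < 1868 from by omega, show ¬ year ≥ 2019 from by omega,
            show year ≥ 1989 from by omega, show ¬ year < 1926 from by omega,
            show ¬ year < 1989 from by omega, show year < 2019 from by omega]
        · simp [warekiScan, gengoTable, altStarts, altNames, brGo, show ¬ year < 1868 from by omega, show year ≥ 2019 from by omega,
            show ¬ year < 1926 from by omega, show ¬ year < 2019 from by omega]
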